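-- pv_equiv track=rewrite | github.com/rsprenkels/kattis | python/2_0/thegrandadventure.py | adventure
-- ===== SOURCE A (Python) =====
-- def adventure(adv_str : str) -> bool:
--     backpack = []
--     for item in adv_str:
--         if item in '$|*':
--             backpack.append(item)
--         elif item == 'b' and backpack and backpack[-1] == '$':
--             backpack.pop()
--         elif item == 't' and backpack and backpack[-1] == '|':
--             backpack.pop()
--         elif item == 'j' and backpack and backpack[-1] == '*':
--             backpack.pop()
--         elif item == '.':
--             pass
--         else:
--             return False
--     return len(backpack) == 0
-- ===== SOURCE B (Python) =====
-- def _strip(s, a, b):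
--     out = []
--     i = 0
--     while i < len(s):
--         if i + 1 < len(s) and s[i] == a and s[i + 1] == b:
--             i += 2
--         else:
--             out.append(s[i])
--             i += 1
--     return out
--
--
-- def adventure(adv_str: str) -> bool:
--     s = [c for c in adv_str if c != '.']
--     if any(c not in '$|*btj' for c in s):
--         return False
--     while True:
--         t = _strip(_strip(_strip(s, '$', 'b'), '|', 't'), '*', 'j')
--         if t == s:
--             return s == []
--         s = t
-- ===== Notes on version B (the rewrite author's own statement) =====
-- stated objective: alternative
-- what changed: Replaced the single-pass stack matcher with an iterated rewriting reduction: drop dots, reject invalid characters, then repeatedly delete adjacent matched pairs ($b, |t, *j) until a fixed point and test emptiness.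
import Mathlib
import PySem

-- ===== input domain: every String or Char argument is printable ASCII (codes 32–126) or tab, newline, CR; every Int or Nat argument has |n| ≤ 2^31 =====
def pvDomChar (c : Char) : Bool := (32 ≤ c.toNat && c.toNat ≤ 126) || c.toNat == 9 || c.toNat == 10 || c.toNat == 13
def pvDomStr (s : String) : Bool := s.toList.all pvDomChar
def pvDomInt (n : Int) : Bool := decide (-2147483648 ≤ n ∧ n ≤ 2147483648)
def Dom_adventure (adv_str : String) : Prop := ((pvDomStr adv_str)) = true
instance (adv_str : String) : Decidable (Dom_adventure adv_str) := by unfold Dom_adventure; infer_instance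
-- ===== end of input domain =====

-- B replaces A's single-pass stack with an iterated adjacent-pair deletion to a fixed point (alternative algorithm, not faster).

-- ===== PORT A =====
-- the stack is kept head-first: Python's backpack[-1] is the head, append pushes at the head, pop drops it
def adventureGo : List Char → List Char → Bool
  | [], backpack => backpack.isEmpty
  | item :: rest, backpack =>
    if item = '$' ∨ item = '|' ∨ item = '*' then adventureGo rest (item :: backpack)
    else if item = 'b' ∧ backpack.head? = some '$' then adventureGo rest backpack.tail
    else if item = 't' ∧ backpack.head? = some '|' then adventureGo rest backpack.tail
    else if item = 'j' ∧ backpack.head? = some '*' then adventureGo rest backpack.tail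
    else if item = '.' then adventureGo rest backpack
    else false

def adventure (adv_str : String) : Bool := adventureGo adv_str.toList []

-- ===== PORT B =====
-- _strip: delete every adjacent occurrence of the pair [a, b] in one left-to-right pass
def stripPair (a b : Char) : List Char → List Char
  | [] => []
  | [c] => [c]
  | c :: d :: t => if c = a ∧ d = b then stripPair a b t else c :: stripPair a b (d :: t)

def strip3 (l : List Char) : List Char :=
  stripPair '*' 'j' (stripPair '|' 't' (stripPair '$' 'b' l))

theorem stripPair_length_le (a b : Char) (l : List Char) :
    (stripPair a b l).length ≤ l.length := by
  fun_induction stripPair a b l with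
  | case1 => simp
  | case2 => simp
  | case3 c d t h ih => simp; omega
  | case4 c d t h ih => simpa using ih

theorem stripPair_eq_of_length (a b : Char) (l : List Char)
    (h : (stripPair a b l).length = l.length) : stripPair a b l = l := by
  fun_induction stripPair a b l with
  | case1 => rfl
  | case2 => rfl
  | case3 c d t _ ih =>
    exfalso; have := stripPair_length_le a b t; simp at h; omega
  | case4 c d t _ ih => simp at h ⊢; exact ih h

theorem strip3_length_lt (l : List Char) (h : strip3 l ≠ l) :
    (strip3 l).length < l.length := by
  have h1 := stripPair_length_le '$' 'b' l
  have h2 := stripPair_length_le '|' 't' (stripPair '$' 'b' l)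
  have h3 := stripPair_length_le '*' 'j' (stripPair '|' 't' (stripPair '$' 'b' l))
  by_contra hge
  simp only [strip3, not_lt] at hge h
  have e1 : stripPair '$' 'b' l = l := stripPair_eq_of_length '$' 'b' l (by omega)
  rw [e1] at hge h h2 h3
  have e2 : stripPair '|' 't' l = l := stripPair_eq_of_length '|' 't' l (by omega)
  rw [e2] at hge h h3
  have e3 : stripPair '*' 'j' l = l := stripPair_eq_of_length '*' 'j' l (by omega)
  exact h e3

-- the while-True loop of B: rewrite with strip3 until a fixed point
def reduceLoop (l : List Char) : List Char :=
  let t := strip3 l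
  if h : t = l then l else reduceLoop t
termination_by l.length
decreasing_by exact strip3_length_lt l h

def adventure_alt (adv_str : String) : Bool :=
  let s := adv_str.toList.filter (fun c => c ≠ '.')
  if s.any (fun c => ¬ (c ∈ (['$', '|', '*', 'b', 't', 'j'] : List Char))) then false
  else decide (reduceLoop s = [])

-- ===== PRECONDITION & SPEC =====
def Spec_adventure (adv_str : String) (out : Bool) : Prop := out = adventure_alt adv_str
instance (adv_str : String) (out : Bool) : Decidable (Spec_adventure adv_str out) := by unfold Spec_adventure; infer_instance

-- ===== CLAIM (what is proved, stated in full; the proofs are below) =====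
def Claim_equal_adventure : Prop := ∀ (adv_str : String), Dom_adventure adv_str → Spec_adventure adv_str (adventure adv_str)

-- ===== LEMMAS AND PROOFS =====

-- proof-only semantic function: A's loop with the early False made a none
def runA : List Char → List Char → Option (List Char)
  | [], backpack => some backpack
  | item :: rest, backpack =>
    if item = '$' ∨ item = '|' ∨ item = '*' then runA rest (item :: backpack)
    else if item = 'b' ∧ backpack.head? = some '$' then runA rest backpack.tail
    else if item = 't' ∧ backpack.head? = some '|' then runA rest backpack.tail
    else if item = 'j' ∧ backpack.head? = some '*' then runA rest backpack.tail
    else if item = '.' then runA rest backpack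
    else none

theorem adventureGo_eq_runA (l bp : List Char) :
    adventureGo l bp = ((runA l bp).map List.isEmpty).getD false := by
  induction l generalizing bp with
  | nil => rfl
  | cons c t ih =>
    simp only [adventureGo, runA]
    split_ifs <;> first | exact ih _ | rfl

def isPair (a b : Char) : Prop := (a = '$' ∧ b = 'b') ∨ (a = '|' ∧ b = 't') ∨ (a = '*' ∧ b = 'j')

theorem runA_stripPair (a b : Char) (hp : isPair a b) (l : List Char) :
    ∀ bp, runA (stripPair a b l) bp = runA l bp := by
  fun_induction stripPair a b l with
  | case1 => intro bp; rfl
  | case2 => intro bp; rfl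
  | case3 c d t h ih =>
    intro bp
    obtain ⟨rfl, rfl⟩ := h
    rcases hp with ⟨h1, h2⟩ | ⟨h1, h2⟩ | ⟨h1, h2⟩ <;> subst h1 <;> subst h2
    · rw [runA, if_pos (by decide), runA, if_neg (by decide), if_pos ⟨rfl, rfl⟩]
      exact ih bp
    · rw [runA, if_pos (by decide), runA, if_neg (by decide),
          if_neg (fun hx => absurd hx.1 (by decide)), if_pos ⟨rfl, rfl⟩]
      exact ih bp
    · rw [runA, if_pos (by decide), runA, if_neg (by decide),
          if_neg (fun hx => absurd hx.1 (by decide)),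
          if_neg (fun hx => absurd hx.1 (by decide)), if_pos ⟨rfl, rfl⟩]
      exact ih bp
  | case4 c d t h ih =>
    intro bp
    rw [runA]
    conv_rhs => rw [runA]
    split_ifs <;> first | rfl | exact ih _

theorem runA_strip3 (l bp : List Char) : runA (strip3 l) bp = runA l bp := by
  unfold strip3
  rw [runA_stripPair '*' 'j' (by simp [isPair]),
      runA_stripPair '|' 't' (by simp [isPair]),
      runA_stripPair '$' 'b' (by simp [isPair])]

theorem runA_reduceLoop (l : List Char) : ∀ bp, runA (reduceLoop l) bp = runA l bp := by
  fun_induction reduceLoop l with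
  | case1 l t h => intro bp; rfl
  | case2 l t h ih => intro bp; rw [ih]; exact runA_strip3 l bp

theorem strip3_reduceLoop (l : List Char) : strip3 (reduceLoop l) = reduceLoop l := by
  fun_induction reduceLoop l with
  | case1 l t h => exact h
  | case2 l t h ih => exact ih

theorem stripPair_sublist (a b : Char) (l : List Char) : (stripPair a b l).Sublist l := by
  fun_induction stripPair a b l with
  | case1 => simp
  | case2 => simp
  | case3 c d t h ih => exact ih.trans (by simp)
  | case4 c d t h ih => exact ih.cons₂ c

theorem strip3_sublist (l : List Char) : (strip3 l).Sublist l :=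
  ((stripPair_sublist '*' 'j' _).trans (stripPair_sublist '|' 't' _)).trans
    (stripPair_sublist '$' 'b' l)

theorem reduceLoop_sublist (l : List Char) : (reduceLoop l).Sublist l := by
  fun_induction reduceLoop l with
  | case1 l t h => exact List.Sublist.refl l
  | case2 l t h ih => exact ih.trans (strip3_sublist l)

theorem stripPair_fixed_chain (a b : Char) (l : List Char) (h : stripPair a b l = l) :
    l.IsChain (fun x y => ¬ (x = a ∧ y = b)) := by
  fun_induction stripPair a b l with
  | case1 => exact List.isChain_nil
  | case2 => exact List.isChain_singleton _
  | case3 c d t hp ih =>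
    exfalso
    have hle := stripPair_length_le a b t
    have : (stripPair a b t).length = t.length + 2 := by rw [h]; simp
    omega
  | case4 c d t hp ih =>
    simp only [List.cons.injEq] at h
    exact List.isChain_cons_cons.mpr ⟨hp, ih h.2⟩

theorem strip3_fixed_parts (l : List Char) (h : strip3 l = l) :
    stripPair '$' 'b' l = l ∧ stripPair '|' 't' l = l ∧ stripPair '*' 'j' l = l := by
  have h1 := stripPair_length_le '$' 'b' l
  have h2 := stripPair_length_le '|' 't' (stripPair '$' 'b' l)
  have h3 := stripPair_length_le '*' 'j' (stripPair '|' 't' (stripPair '$' 'b' l))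
  have hlen : (strip3 l).length = l.length := by rw [h]
  unfold strip3 at hlen
  have e1 : stripPair '$' 'b' l = l := stripPair_eq_of_length '$' 'b' l (by omega)
  rw [e1] at hlen h2 h3
  have e2 : stripPair '|' 't' l = l := stripPair_eq_of_length '|' 't' l (by omega)
  rw [e2] at hlen h3
  have e3 : stripPair '*' 'j' l = l := stripPair_eq_of_length '*' 'j' l (by omega)
  exact ⟨e1, e2, e3⟩

def NotPair (x y : Char) : Prop :=
  ¬ (x = '$' ∧ y = 'b') ∧ ¬ (x = '|' ∧ y = 't') ∧ ¬ (x = '*' ∧ y = 'j')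

theorem isChain_and3 {P Q R : Char → Char → Prop} (l : List Char)
    (hP : l.IsChain P) (hQ : l.IsChain Q) (hR : l.IsChain R) :
    l.IsChain (fun x y => P x y ∧ Q x y ∧ R x y) := by
  induction l with
  | nil => exact List.isChain_nil
  | cons c t ih =>
    cases t with
    | nil => exact List.isChain_singleton _
    | cons d t' =>
      rw [List.isChain_cons_cons] at hP hQ hR ⊢
      exact ⟨⟨hP.1, hQ.1, hR.1⟩, ih hP.2 hQ.2 hR.2⟩

theorem strip3_fixed_chain (l : List Char) (h : strip3 l = l) : l.IsChain NotPair := by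
  obtain ⟨e1, e2, e3⟩ := strip3_fixed_parts l h
  exact isChain_and3 l (stripPair_fixed_chain _ _ _ e1)
    (stripPair_fixed_chain _ _ _ e2) (stripPair_fixed_chain _ _ _ e3)

def Valid6 (c : Char) : Prop := c ∈ (['$', '|', '*', 'b', 't', 'j'] : List Char)

-- the key stack invariant: under an opener whose matching closer does not follow,
-- an irreducible valid word can never empty the stack
theorem runA_under_opener (w : List Char) :
    ∀ (o : Char) (bp : List Char), (∀ c ∈ w, Valid6 c) →
    (o :: w).IsChain NotPair → (o = '$' ∨ o = '|' ∨ o = '*') →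
    runA w (o :: bp) = none ∨ ∃ st, runA w (o :: bp) = some st ∧ st ≠ [] := by
  induction w with
  | nil =>
    intro o bp _ _ _
    exact Or.inr ⟨o :: bp, rfl, by simp⟩
  | cons c t ih =>
    intro o bp hv hch ho
    have hnp : NotPair o c := (List.isChain_cons_cons.mp hch).1
    have hch' : (c :: t).IsChain NotPair := (List.isChain_cons_cons.mp hch).2
    have hvc : Valid6 c := hv c (by simp)
    have hvt : ∀ x ∈ t, Valid6 x := fun x hx => hv x (by simp [hx])
    simp only [Valid6, List.mem_cons, List.not_mem_nil, or_false] at hvc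
    rcases hvc with rfl | rfl | rfl | rfl | rfl | rfl
    · simpa [runA] using ih '$' (o :: bp) hvt hch' (by simp)
    · simpa [runA] using ih '|' (o :: bp) hvt hch' (by simp)
    · simpa [runA] using ih '*' (o :: bp) hvt hch' (by simp)
    · -- c = 'b': the stack top o is not '$' (NotPair), so A fails here
      have : o ≠ '$' := fun h => hnp.1 ⟨h, rfl⟩
      exact Or.inl (by simp [runA, this])
    · have : o ≠ '|' := fun h => hnp.2.1 ⟨h, rfl⟩
      exact Or.inl (by simp [runA, this])
    · have : o ≠ '*' := fun h => hnp.2.2 ⟨h, rfl⟩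
      exact Or.inl (by simp [runA, this])

theorem runA_irreducible (w : List Char) (hv : ∀ c ∈ w, Valid6 c)
    (hfix : strip3 w = w) (hne : w ≠ []) :
    runA w [] = none ∨ ∃ st, runA w [] = some st ∧ st ≠ [] := by
  have hch := strip3_fixed_chain w hfix
  cases w with
  | nil => exact absurd rfl hne
  | cons c t =>
    have hvc : Valid6 c := hv c (by simp)
    have hvt : ∀ x ∈ t, Valid6 x := fun x hx => hv x (by simp [hx])
    simp only [Valid6, List.mem_cons, List.not_mem_nil, or_false] at hvc
    rcases hvc with rfl | rfl | rfl | rfl | rfl | rfl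
    · simpa [runA] using runA_under_opener t '$' [] hvt hch (by simp)
    · simpa [runA] using runA_under_opener t '|' [] hvt hch (by simp)
    · simpa [runA] using runA_under_opener t '*' [] hvt hch (by simp)
    · exact Or.inl (by simp [runA])
    · exact Or.inl (by simp [runA])
    · exact Or.inl (by simp [runA])

theorem runA_filter_dot (l : List Char) :
    ∀ bp, runA (l.filter (fun c => c ≠ '.')) bp = runA l bp := by
  induction l with
  | nil => intro bp; rfl
  | cons c t ih =>
    intro bp
    by_cases hc : c = '.'
    · subst hc
      rw [List.filter_cons_of_neg (by simp)]
      rw [runA]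
      rw [if_neg (by decide), if_neg (fun h => absurd h.1 (by decide)),
          if_neg (fun h => absurd h.1 (by decide)), if_neg (fun h => absurd h.1 (by decide)),
          if_pos rfl]
      exact ih bp
    · rw [List.filter_cons_of_pos (by simpa using hc)]
      simp only [runA]
      split_ifs <;> first | rfl | exact ih _

theorem runA_invalid (l : List Char) (c : Char) (hc : c ∈ l) (hnv : ¬ Valid6 c)
    (hnd : c ≠ '.') : ∀ bp, runA l bp = none := by
  induction l with
  | nil => exact absurd hc (by simp)
  | cons d t ih =>
    intro bp
    rcases List.mem_cons.mp hc with rfl | hct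
    · simp only [Valid6, List.mem_cons, List.not_mem_nil, or_false, not_or] at hnv
      obtain ⟨h1, h2, h3, h4, h5, h6⟩ := hnv
      simp [runA, h1, h2, h3, h4, h5, h6, hnd]
    · simp only [runA]
      split_ifs <;> first | rfl | exact ih hct _

-- ===== VERDICT (by name: the statement is the Claim_ definition above) =====
theorem adventure_spec : Claim_equal_adventure := by
  intro s _
  unfold Spec_adventure adventure adventure_alt
  rw [adventureGo_eq_runA, ← runA_filter_dot]
  set l := s.toList.filter (fun c => c ≠ '.') with hl
  by_cases hval : ∃ c ∈ l, ¬ Valid6 c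
  · obtain ⟨c, hcl, hcv⟩ := hval
    have hcd : c ≠ '.' := by
      have hm := hcl
      rw [hl] at hm
      have := List.of_mem_filter hm
      simpa using this
    rw [runA_invalid l c hcl hcv hcd []]
    have hany : l.any (fun c => ¬ (c ∈ (['$', '|', '*', 'b', 't', 'j'] : List Char))) = true := by
      simp only [List.any_eq_true, decide_eq_true_eq]
      exact ⟨c, hcl, by simpa [Valid6] using hcv⟩
    rw [if_pos hany]
    rfl
  · push_neg at hval
    have hany : l.any (fun c => ¬ (c ∈ (['$', '|', '*', 'b', 't', 'j'] : List Char))) = false := by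
      rw [List.any_eq_false]
      intro c hc
      simp only [decide_eq_true_eq]
      exact fun hnot => hnot (by simpa [Valid6] using hval c hc)
    rw [if_neg (by rw [hany]; exact Bool.false_ne_true)]
    rw [← runA_reduceLoop l []]
    by_cases hnf : reduceLoop l = []
    · rw [hnf]
      simp [runA, hnf]
    · have hvnf : ∀ c ∈ reduceLoop l, Valid6 c :=
        fun c hc => hval c ((reduceLoop_sublist l).mem hc)
      rcases runA_irreducible (reduceLoop l) hvnf (strip3_reduceLoop l) hnf with h | ⟨st, hst, hstne⟩
      · simp [h, hnf]
      · cases st with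
        | nil => exact absurd rfl hstne
        | cons x xs => simp [hst, hnf]
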